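-- pv_equiv track=rewrite | github.com/Ricky-ross/BinarySearchTree | subsequence.py | solve
-- ===== SOURCE A (Python) =====
-- from typing import List
--
-- def solve(N: int, A: List[int]) -> int:
--     # code here
--     a = A
--     a.sort()
--     n = N
--     count = 0
--     for i in range(n):
--         if i == 0:
--             count = count + 1
--         else:
--             if a[i] == a[i - 1]:
--                 count = count + 1
--             elif a[i] == a[i - 1] + 1:
--                 count = count + 1
--     return count
-- ===== SOURCE B (Python) =====
-- from typing import List
--
-- def solve(N: int, A: List[int]) -> int:
--     # closed-form over the value set: count = (size of the N-prefix) - (#distinct values whose predecessor is absent) + 1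
--     if N <= 0:
--         return 0
--     p = sorted(A)[:N]
--     s = set(p)
--     missing_pred = sum(1 for d in s if d - 1 not in s)
--     return len(p) - missing_pred + 1
-- ===== Notes on version B (the rewrite author's own statement) =====
-- stated objective: alternative
-- what changed: A scans the sorted prefix index by index comparing each element with its predecessor; B computes the same count in closed form from the prefix's value SET: length of the prefix minus the number of distinct values whose predecessor value is absent, plus one.
import Mathlib
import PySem

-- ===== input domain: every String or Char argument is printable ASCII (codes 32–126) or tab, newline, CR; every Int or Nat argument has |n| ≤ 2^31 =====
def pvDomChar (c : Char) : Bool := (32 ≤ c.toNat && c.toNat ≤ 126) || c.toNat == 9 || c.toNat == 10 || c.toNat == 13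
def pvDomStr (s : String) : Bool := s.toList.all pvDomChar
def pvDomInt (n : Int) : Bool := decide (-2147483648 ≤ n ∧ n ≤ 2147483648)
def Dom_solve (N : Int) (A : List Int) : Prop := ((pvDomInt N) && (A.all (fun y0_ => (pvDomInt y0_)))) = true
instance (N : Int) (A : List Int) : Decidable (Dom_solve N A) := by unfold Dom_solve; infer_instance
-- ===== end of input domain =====

-- B replaces A's adjacent-pair scan over the sorted prefix by a closed form over its value set
-- (prefix length − #distinct values whose predecessor is absent + 1); equivalence is about the
-- RETURN value only: A sorts its argument in place, B does not mutate it.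

-- ===== PORT A =====
def solve (N : Int) (A : List Int) : Int :=
  let a := PySem.List.sorted A (fun x => x)
  (PySem.List.pyRange 0 N).foldl
    (fun count i =>
      if i = 0 then count + 1
      else
        if PySem.List.pyGetD a i 0 = PySem.List.pyGetD a (i - 1) 0 then count + 1
        else if PySem.List.pyGetD a i 0 = PySem.List.pyGetD a (i - 1) 0 + 1 then count + 1
        else count) 0

-- ===== PORT B =====
def solve_alt (N : Int) (A : List Int) : Int :=
  if N ≤ 0 then 0
  else
    let p := PySem.List.slice (PySem.List.sorted A (fun x => x)) none (some N)
    let s := PySem.Set.ofList p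
    let missing : Int := (s.countP (fun d => !(PySem.Set.contains s (d - 1))) : Nat)
    (p.length : Int) - missing + 1

-- ===== PRECONDITION & SPEC =====
-- Pre_ excludes exactly the inputs where A raises IndexError: N ≥ 2 with fewer than N list
-- elements (for N ≤ 1 A's loop never indexes the list, so A returns there even on short lists).
def Pre_solve (N : Int) (A : List Int) : Prop := N ≤ (A.length : Int) ∨ N ≤ 1
instance (N : Int) (A : List Int) : Decidable (Pre_solve N A) := by unfold Pre_solve; infer_instance
def pvWitness_solve : Int × List Int := (4, [3, 1, 2, 2])
def Spec_solve (N : Int) (A : List Int) (out : Int) : Prop := out = solve_alt N A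
instance (N : Int) (A : List Int) (out : Int) : Decidable (Spec_solve N A out) := by unfold Spec_solve; infer_instance

-- ===== CLAIM (what is proved, stated in full; the proofs are below) =====
def Claim_equal_solve : Prop := ∀ (N : Int) (A : List Int), Dom_solve N A → Pre_solve N A → Spec_solve N A (solve N A)

-- ===== LEMMAS AND PROOFS =====

-- proof-only helpers: the adjacent-pair indicator/count A computes, and B's predecessor-missing count
def adjInd (x y : Int) : Int := if y = x ∨ y = x + 1 then 1 else 0

def adjCount : List Int → Int
  | x :: y :: t => adjInd x y + adjCount (y :: t)
  | _ => 0

def missCount (p : List Int) : Nat :=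
  (PySem.List.dedup p).countP (fun d => !(p.contains (d - 1)))

lemma countP_eq_of_nodup_mem {α : Type} (f : α → Bool) {l₁ l₂ : List α}
    (h₁ : l₁.Nodup) (h₂ : l₂.Nodup) (hm : ∀ a, a ∈ l₁ ↔ a ∈ l₂) :
    l₁.countP f = l₂.countP f :=
  ((List.perm_ext_iff_of_nodup h₁ h₂).mpr hm).countP_eq f

lemma contains_eq_false_of_forall_lt (l : List Int) (v : Int)
    (h : ∀ z ∈ l, v < z) : l.contains v = false := by
  rw [← Bool.not_eq_true, List.contains_iff_mem]
  intro hv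
  exact absurd (h v hv) (lt_irrefl v)

lemma adjCount_eq_sub (p : List Int) (hs : p.Pairwise (· ≤ ·)) (hne : p ≠ []) :
    adjCount p = (p.length : Int) - (missCount p : Int) := by
  induction p with
  | nil => exact absurd rfl hne
  | cons x t iht =>
    cases t with
    | nil =>
      have h1 : missCount [x] = 1 := by
        have : ([x].contains (x - 1)) = false :=
          contains_eq_false_of_forall_lt _ _ (by intro z hz; simp at hz; omega)
        simp [missCount, PySem.List.dedup, PySem.Set.ofList, PySem.Set.add,
          PySem.Set.empty]
      simp [adjCount, h1]
    | cons y t' =>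
      obtain ⟨hx, hp'⟩ := List.pairwise_cons.mp hs
      have hxy : x ≤ y := hx y (by simp)
      have hyall : ∀ z ∈ y :: t', y ≤ z := by
        intro z hz
        rcases List.mem_cons.mp hz with rfl | hz
        · exact le_refl z
        · exact (List.pairwise_cons.mp hp').1 z hz
      have hxall : ∀ z ∈ y :: t', x ≤ z := fun z hz => le_trans hxy (hyall z hz)
      have iht' := iht hp' (by simp)
      have hadj : adjCount (x :: y :: t') = adjInd x y + adjCount (y :: t') := rfl
      have hlen : ((x :: y :: t').length : Int) = ((y :: t').length : Int) + 1 := by simp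
      by_cases hyx : y = x
      · -- duplicate head: the value set and both counts are unchanged
        have hmm : missCount (x :: y :: t') = missCount (y :: t') := by
          unfold missCount
          rw [countP_eq_of_nodup_mem _ (PySem.List.nodup_dedup _)
            (h₂ := PySem.List.nodup_dedup (y :: t'))
            (by intro z
                simp only [PySem.List.mem_dedup, List.mem_cons]
                subst hyx
                tauto)]
          refine List.countP_congr ?_
          intro d _
          subst hyx
          simp
        have hInd : adjInd x y = 1 := by simp [adjInd, hyx]
        rw [hadj, hInd]
        omega
      · have hxnot : x ∉ y :: t' := by
          intro h
          have := hyall x h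
          have := lt_of_le_of_ne hxy (fun h' => hyx h'.symm)
          omega
        have hsplit : ∀ f : Int → Bool, (PySem.List.dedup (x :: y :: t')).countP f
            = (if f x then 1 else 0) + (PySem.List.dedup (y :: t')).countP f := by
          intro f
          rw [countP_eq_of_nodup_mem f (PySem.List.nodup_dedup _)
            (l₂ := x :: PySem.List.dedup (y :: t'))
            (by simp [List.nodup_cons, hxnot])
            (by intro z; simp only [PySem.List.mem_dedup, List.mem_cons]; try tauto)]
          rw [List.countP_cons]
          omega
        have hfx : (!( (x :: y :: t').contains (x - 1))) = true := by
          rw [contains_eq_false_of_forall_lt _ _ (by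
            intro z hz
            rcases List.mem_cons.mp hz with rfl | hz
            · omega
            · have := hxall z hz; omega)]
          rfl
        by_cases hy1 : y = x + 1
        · -- y = x+1: x is newly predecessor-missing, y no longer is
          have hyl : y ∈ PySem.List.dedup (y :: t') := by
            rw [PySem.List.mem_dedup]; simp
          have hperm := List.perm_cons_erase hyl
          have hcp : ∀ f : Int → Bool, (PySem.List.dedup (y :: t')).countP f
              = (if f y then 1 else 0) + ((PySem.List.dedup (y :: t')).erase y).countP f := by
            intro f
            rw [hperm.countP_eq f]
            simp [List.countP_cons]
            omega
          have herase : ∀ d ∈ (PySem.List.dedup (y :: t')).erase y,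
              (!( (x :: y :: t').contains (d - 1))) = (!( (y :: t').contains (d - 1))) := by
            intro d hd
            obtain ⟨hdy, hdl⟩ := (List.Nodup.mem_erase_iff (PySem.List.nodup_dedup _)).mp hd
            have hdm : d ∈ y :: t' := (PySem.List.mem_dedup _ _).mp hdl
            have hdg : y < d := lt_of_le_of_ne (hyall d hdm) (fun h => hdy h.symm)
            simp only [List.contains_cons]
            have hne' : (x == d - 1) = false := by
              simp only [beq_eq_false_iff_ne]
              omega
            simp
            intro h1 h2
            omega
          have hfy : (!( (x :: y :: t').contains (y - 1))) = false := by
            have hmem : (x :: y :: t').contains (y - 1) = true := by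
              rw [List.contains_iff_mem]
              have : y - 1 = x := by omega
              rw [this]
              simp
            rw [hmem]
            rfl
          have hsy : (!( (y :: t').contains (y - 1))) = true := by
            rw [contains_eq_false_of_forall_lt _ _ (by intro z hz; have := hyall z hz; omega)]
            rfl
          have hcc : List.countP (fun d => !( (x :: y :: t').contains (d - 1)))
              ((PySem.List.dedup (y :: t')).erase y)
              = List.countP (fun d => !( (y :: t').contains (d - 1)))
              ((PySem.List.dedup (y :: t')).erase y) :=
            List.countP_congr (fun d hd => by rw [herase d hd])
          have hmm : missCount (x :: y :: t') = missCount (y :: t') := by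
            unfold missCount
            rw [hsplit, hfx, hcp (fun d => !( (x :: y :: t').contains (d - 1))),
              hcp (fun d => !( (y :: t').contains (d - 1))), hfy, hsy, hcc]
            simp
          have hInd : adjInd x y = 1 := by simp [adjInd, hy1]
          rw [hadj, hInd]
          omega
        · -- gap: x is a new predecessor-missing value, everything else unchanged
          have hmm : missCount (x :: y :: t') = 1 + missCount (y :: t') := by
            unfold missCount
            rw [hsplit, hfx]
            simp only [if_true]
            congr 1
            refine List.countP_congr ?_
            intro d hd
            have hdm : d ∈ y :: t' := (PySem.List.mem_dedup _ _).mp hd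
            have hdg : y ≤ d := hyall d hdm
            have hxlt : x < y := lt_of_le_of_ne hxy (fun h' => hyx h'.symm)
            simp only [List.contains_cons]
            have hne' : (x == d - 1) = false := by
              simp only [beq_eq_false_iff_ne]
              omega
            simp
            intro h1 h2
            omega
          have hInd : adjInd x y = 0 := by
            have hxlt : x < y := lt_of_le_of_ne hxy (fun h' => hyx h'.symm)
            unfold adjInd
            split_ifs with h
            · rcases h with h | h <;> omega
            · rfl
          rw [hadj, hInd]
          omega

lemma adjCount_take_succ (a : List Int) (n : Nat) (h1 : 1 ≤ n) (h2 : n < a.length) :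
    adjCount (a.take (n + 1)) = adjCount (a.take n) + adjInd (a[n - 1]'(by omega)) (a[n]'h2) := by
  induction n generalizing a with
  | zero => omega
  | succ m ih =>
    match a, h2 with
    | x :: xs, h2 =>
      have hx : m < xs.length := by simpa using h2
      by_cases hm : m = 0
      · subst hm
        match xs, hx with
        | y :: ys, _ => simp [adjCount]
      · obtain ⟨k, rfl⟩ : ∃ k, m = k + 1 := ⟨m - 1, by omega⟩
        match xs, hx with
        | w :: ws, hx =>
          have := ih (w :: ws) (by omega) hx
          simp only [List.take, adjCount, Nat.add_sub_cancel, List.getElem_cons_succ] at this ⊢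
          omega

lemma foldA_eq (a : List Int) (n : Nat) (h : n ≤ a.length) :
    (PySem.List.pyRange 0 (n : Int)).foldl
      (fun count i =>
        if i = 0 then count + 1
        else
          if PySem.List.pyGetD a i 0 = PySem.List.pyGetD a (i - 1) 0 then count + 1
          else if PySem.List.pyGetD a i 0 = PySem.List.pyGetD a (i - 1) 0 + 1 then count + 1
          else count) 0
      = if n = 0 then 0 else 1 + adjCount (a.take n) := by
  induction n with
  | zero => simp [PySem.List.pyRange_one_eq_nil]
  | succ n ih =>
    rw [show ((n + 1 : Nat) : Int) = (n : Int) + 1 by push_cast; ring,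
      PySem.List.pyRange_one_succ_right (by positivity), List.foldl_append,
      ih (by omega)]
    simp only [List.foldl_cons, List.foldl_nil]
    by_cases hn : n = 0
    · subst hn
      have h0 : adjCount (a.take 1) = 0 := by
        cases a <;> simp [adjCount]
      simp [h0]
    · have h1 : 1 ≤ n := by omega
      have hlt : n < a.length := by omega
      have gi : PySem.List.pyGetD a (n : Int) 0 = a[n]'hlt := by
        rw [PySem.List.pyGetD_eq_getElem a 0 (by positivity) (by exact_mod_cast hlt)]
        simp
      have gim : PySem.List.pyGetD a ((n : Int) - 1) 0 = a[n - 1]'(by omega) := by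
        rw [PySem.List.pyGetD_eq_getElem a 0 (by omega) (by omega)]
        congr 1
        omega
      have hne : ((n : Int)) ≠ 0 := by exact_mod_cast hn
      rw [adjCount_take_succ a n h1 hlt]
      simp only [hne, if_false, gi, gim, adjInd]
      split_ifs with e1 e2 e3 <;> simp_all <;> omega

lemma contains_ofList (p : List Int) (z : Int) :
    PySem.Set.contains (PySem.Set.ofList p) z = p.contains z := by
  rw [Bool.eq_iff_iff]
  simp only [PySem.Set.contains, List.contains_iff_mem, ← PySem.List.dedup_eq_ofList,
    PySem.List.mem_dedup]

lemma solve_alt_pos (n : Nat) (A : List Int) (hn : 1 ≤ n)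
    (_hle : n ≤ A.length) :
    solve_alt (n : Int) A
      = ((PySem.List.sorted A (fun x => x)).take n).length
        - (missCount ((PySem.List.sorted A (fun x => x)).take n) : Int) + 1 := by
  unfold solve_alt
  rw [if_neg (by omega)]
  rw [PySem.List.slice_to _ (by positivity)]
  simp only [Int.toNat_natCast]
  congr 2
  unfold missCount
  rw [PySem.List.dedup_eq_ofList]
  exact_mod_cast List.countP_congr (fun d _ => by rw [contains_ofList])

theorem solve_spec : Claim_equal_solve := by
  intro N A _ hpre
  show solve N A = solve_alt N A
  by_cases hN0 : N ≤ 0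
  · unfold solve solve_alt
    rw [PySem.List.pyRange_one_eq_nil hN0]
    simp [hN0]
  · by_cases hle : N ≤ (A.length : Int)
    · obtain ⟨n, rfl⟩ : ∃ n : Nat, N = (n : Int) := ⟨N.toNat, by omega⟩
      have hn1 : 1 ≤ n := by omega
      have hnle : n ≤ A.length := by exact_mod_cast hle
      have hnle' : n ≤ (PySem.List.sorted A (fun x => x)).length := by
        rw [PySem.List.length_sorted]
        exact hnle
      have hlhs : solve (n : Int) A
          = 1 + adjCount ((PySem.List.sorted A (fun x => x)).take n) := by
        show (PySem.List.pyRange 0 (n : Int)).foldl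
          (fun count i =>
            if i = 0 then count + 1
            else
              if PySem.List.pyGetD (PySem.List.sorted A (fun x => x)) i 0
                  = PySem.List.pyGetD (PySem.List.sorted A (fun x => x)) (i - 1) 0 then count + 1
              else if PySem.List.pyGetD (PySem.List.sorted A (fun x => x)) i 0
                  = PySem.List.pyGetD (PySem.List.sorted A (fun x => x)) (i - 1) 0 + 1 then count + 1
              else count) 0 = _
        rw [foldA_eq _ n hnle']
        rw [if_neg (by omega)]
      have hsorted : ((PySem.List.sorted A (fun x => x)).take n).Pairwise (· ≤ ·) := by
        have := PySem.List.sorted_pairwise A (fun x => x)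
        exact List.Pairwise.sublist (List.take_sublist n _) this
      have hplen : ((PySem.List.sorted A (fun x => x)).take n).length = n := by
        rw [List.length_take]
        omega
      have hpne : (PySem.List.sorted A (fun x => x)).take n ≠ [] :=
        List.ne_nil_of_length_pos (by omega)
      rw [hlhs, solve_alt_pos n A hn1 hnle, adjCount_eq_sub _ hsorted hpne]
      omega
    · have hN1 : N = 1 := by rcases hpre with h | h <;> omega
      have hA0 : A = [] := by
        cases A with
        | nil => rfl
        | cons z t => simp at hle; omega
      subst hN1
      subst hA0
      decide
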